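-- pv_equiv track=rewrite | github.com/thealper2/codewars-solutions | 6-kyu/ascend_descend_repeat.py | ascend_descend
-- ===== SOURCE A (Python) =====
-- def ascend_descend(length, minimum, maximum):
--     if maximum < minimum or length == 0:
--         return ""
--
--     if minimum == maximum:
--         return str(minimum) * length
--
--     result = []
--     current = minimum
--     direction = 1
--
--     while len("".join(result)) < length:
--         num_str = str(current)
--         result.append(num_str)
--
--         if len("".join(result)) > length:
--             break
--
--         if current == maximum:
--             direction = -1
--         elif current == minimum:
--             direction = 1
--
--         current += direction
--
--     final_string = "".join(result)
--     return final_string[:length]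
-- ===== SOURCE B (Python) =====
-- def ascend_descend(length, minimum, maximum):
--     if maximum < minimum or length <= 0:
--         return ""
--     if minimum == maximum:
--         return str(minimum) * length
--     if maximum - minimum > length:
--         # the first `length` characters all come from the ascent; never build the full period
--         return "".join(map(str, range(minimum, minimum + length + 1)))[:length]
--     period = "".join(map(str, list(range(minimum, maximum + 1)) + list(range(maximum - 1, minimum, -1))))
--     reps = -(-length // len(period))
--     return (period * reps)[:length]
-- ===== Notes on version B (the rewrite author's own statement) =====
-- stated objective: alternative
-- what changed: Replaces the while loop that re-joins the whole result list to measure its length on every iteration with a closed-form construction: one period string min..max..min+1 (or just the ascent when the span exceeds length) repeated ceil(length/|period|) times and sliced to length.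
import Mathlib
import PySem

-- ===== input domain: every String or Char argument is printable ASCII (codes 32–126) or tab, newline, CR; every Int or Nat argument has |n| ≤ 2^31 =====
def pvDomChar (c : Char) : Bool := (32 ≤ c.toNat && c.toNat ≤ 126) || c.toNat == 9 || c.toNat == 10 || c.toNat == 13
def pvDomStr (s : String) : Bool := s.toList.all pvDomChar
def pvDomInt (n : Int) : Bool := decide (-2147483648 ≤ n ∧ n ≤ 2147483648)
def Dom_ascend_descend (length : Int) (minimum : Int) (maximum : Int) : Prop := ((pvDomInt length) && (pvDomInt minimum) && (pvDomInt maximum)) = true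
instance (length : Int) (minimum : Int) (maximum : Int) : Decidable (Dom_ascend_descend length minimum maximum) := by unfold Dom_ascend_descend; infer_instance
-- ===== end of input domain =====

-- B replaces A's re-join-and-count while loop by a closed-form construction: one period string
-- (min..max..min+1), or just the ascent when the span exceeds length, repeated ceil(length/|period|)
-- times and sliced to length; objective: alternative (no loop over the growing result).

-- ===== PORT A =====
-- helper lemmas the loop's termination proof cites (str(n) is never empty; join length is additive)
theorem pvToDigitsCore_len (b : Nat) (hb : 2 ≤ b) :
    ∀ (f n : Nat) (l : List Char), n < f → l.length < (Nat.toDigitsCore b f n l).length := by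
  intro f
  induction f with
  | zero => intro n l h; omega
  | succ f ih =>
    intro n l h
    rw [Nat.toDigitsCore]
    by_cases h0 : n / b = 0
    · simp [h0]
    · rw [if_neg h0]
      have hn0 : 0 < n := by
        rcases Nat.eq_zero_or_pos n with h' | h'
        · subst h'; simp at h0
        · exact h'
      have hnb : n / b < n := Nat.div_lt_self hn0 (by omega)
      have := ih (n / b) ((n % b).digitChar :: l) (by omega)
      simp only [List.length_cons] at this
      omega

theorem pvToChars_ne_nil (n : Int) : PySem.Int.toChars n ≠ [] := by
  unfold PySem.Int.toChars
  split
  · simp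
  · intro h
    have := pvToDigitsCore_len 10 (by omega) (n.toNat + 1) n.toNat [] (by omega)
    rw [show Nat.toDigits 10 n.toNat = Nat.toDigitsCore 10 (n.toNat + 1) n.toNat [] from rfl] at h
    simp [h] at this

theorem pvToStr_len_pos (n : Int) : 0 < (PySem.Int.toStr n).toList.length := by
  rw [PySem.Int.toList_toStr]
  exact List.length_pos_iff.mpr (pvToChars_ne_nil n)

theorem pvJoin_flatten (css : List (List Char)) :
    PySem.Chars.join [] css = css.flatten := by
  induction css with
  | nil => simp [PySem.Chars.join_nil]
  | cons p rest ih =>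
    cases rest with
    | nil => simp [PySem.Chars.join_singleton]
    | cons q r => rw [PySem.Chars.join_cons_cons]; simp at ih ⊢; simp [ih]

theorem pvJoin_toList (rs : List String) :
    (PySem.Str.join "" rs).toList = (rs.map String.toList).flatten := by
  rw [PySem.Str.toList_join]
  have : ("" : String).toList = [] := rfl
  rw [this, pvJoin_flatten]

theorem pvJoin_len_append (rs : List String) (s : String) :
    PySem.Str.len (PySem.Str.join "" (rs ++ [s]))
      = PySem.Str.len (PySem.Str.join "" rs) + s.toList.length := by
  rw [PySem.Str.len_eq, PySem.Str.len_eq, pvJoin_toList, pvJoin_toList, List.map_append]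
  simp

-- the while loop of A, verbatim: state (result, current, direction); stops when the joined
-- result reaches `length` (or breaks just after overshooting it)
def adLoop (L m M : Int) (result : List String) (current direction : Int) : List String :=
  if PySem.Str.len (PySem.Str.join "" result) < L then
    let num_str := PySem.Int.toStr current
    let result2 := result ++ [num_str]
    if PySem.Str.len (PySem.Str.join "" result2) > L then result2
    else
      let direction2 : Int := if current == M then -1 else if current == m then 1 else direction
      adLoop L m M result2 (current + direction2) direction2
  else result
termination_by (L - PySem.Str.len (PySem.Str.join "" result)).toNat
decreasing_by
  have h1 := pvJoin_len_append result (PySem.Int.toStr current)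
  have h2 := pvToStr_len_pos current
  omega

def ascend_descend (length : Int) (minimum : Int) (maximum : Int) : String :=
  if maximum < minimum || length == 0 then ""
  else if minimum == maximum then
    -- str(minimum) * length : string repetition ported via pyRepeat on the code points (exact)
    String.ofList (PySem.List.pyRepeat (PySem.Int.toStr minimum).toList length)
  else
    let final := adLoop length minimum maximum [] minimum 1
    PySem.Str.slice (PySem.Str.join "" final) none (some length)

-- ===== PORT B =====
def ascend_descend_alt (length : Int) (minimum : Int) (maximum : Int) : String :=
  if maximum < minimum || length ≤ 0 then ""
  else if minimum == maximum then
    String.ofList (PySem.List.pyRepeat (PySem.Int.toStr minimum).toList length)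
  else if maximum - minimum > length then
    -- the first `length` characters all come from the ascent; never build the full period
    PySem.Str.slice
      (PySem.Str.join ""
        ((PySem.List.pyRange minimum (minimum + length + 1) 1).map PySem.Int.toStr))
      none (some length)
  else
    let period := PySem.Str.join ""
      ((PySem.List.pyRange minimum (maximum + 1) 1
          ++ PySem.List.pyRange (maximum - 1) minimum (-1)).map PySem.Int.toStr)
    let reps := -(PySem.Int.floordiv (-length) (PySem.Str.len period))
    PySem.Str.slice (String.ofList (PySem.List.pyRepeat period.toList reps)) none (some length)

-- ===== PRECONDITION & SPEC =====
def Spec_ascend_descend (length : Int) (minimum : Int) (maximum : Int) (out : String) : Prop := out = ascend_descend_alt length minimum maximum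
instance (length : Int) (minimum : Int) (maximum : Int) (out : String) : Decidable (Spec_ascend_descend length minimum maximum out) := by unfold Spec_ascend_descend; infer_instance

-- ===== CLAIM (what is proved, stated in full; the proofs are below) =====
def Claim_equal_ascend_descend : Prop := ∀ (length : Int) (minimum : Int) (maximum : Int), Dom_ascend_descend length minimum maximum → Spec_ascend_descend length minimum maximum (ascend_descend length minimum maximum)

-- ===== LEMMAS AND PROOFS =====

-- state transition of A's loop and the stream of strings it would append, and their basic algebra
def pvStep (m M : Int) (s : Int × Int) : Int × Int :=
  let d : Int := if s.1 == M then -1 else if s.1 == m then 1 else s.2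
  (s.1 + d, d)

def pvEmit (m M : Int) (s : Int × Int) : Nat → List String
  | 0 => []
  | n + 1 => PySem.Int.toStr s.1 :: pvEmit m M (pvStep m M s) n

def pvJ (rs : List String) : List Char := (rs.map String.toList).flatten

theorem pvJ_append (rs ss : List String) : pvJ (rs ++ ss) = pvJ rs ++ pvJ ss := by
  simp [pvJ]

theorem pvJ_len (rs : List String) :
    PySem.Str.len (PySem.Str.join "" rs) = (pvJ rs).length := by
  rw [PySem.Str.len_eq, pvJoin_toList]; rfl

-- the main loop lemma: the length-L prefixes of the loop's joined result and of
-- (acc ++ stream sample) agree, provided the sample is long enough to cover L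
theorem pvLoop_take (L m M : Int) :
    ∀ (acc : List String) (c d : Int) (n : Nat),
      L ≤ (pvJ acc).length + ((pvJ (pvEmit m M (c, d) n)).length : Int) →
      (pvJ (adLoop L m M acc c d)).take L.toNat
        = (pvJ acc ++ pvJ (pvEmit m M (c, d) n)).take L.toNat := by
  intro acc c d n
  fun_induction adLoop L m M acc c d generalizing n with
  | case1 a b c e f g hbrk =>
    intro hn
    cases n with
    | zero =>
      exfalso
      rw [pvJ_len] at e
      rw [show pvEmit m M (b, c) 0 = [] from rfl,
        show pvJ ([] : List String) = [] from rfl] at hn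
      simp only [List.length_nil, Nat.cast_zero, add_zero] at hn
      omega
    | succ n' =>
      rw [pvJ_len] at hbrk
      have hg : pvJ g = pvJ a ++ (PySem.Int.toStr b).toList := by simp [g, f, pvJ]
      have hEm : pvJ (pvEmit m M (b, c) (n' + 1))
          = (PySem.Int.toStr b).toList ++ pvJ (pvEmit m M (pvStep m M (b, c)) n') := by
        simp [pvEmit, pvJ]
      rw [hEm, ← List.append_assoc, ← hg, List.take_append_of_le_length (by omega)]
  | case2 a b c e f g h d2 ih1 =>
    intro hn
    cases n with
    | zero =>
      exfalso
      rw [pvJ_len] at e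
      rw [show pvEmit m M (b, c) 0 = [] from rfl,
        show pvJ ([] : List String) = [] from rfl] at hn
      simp only [List.length_nil, Nat.cast_zero, add_zero] at hn
      omega
    | succ n' =>
      have hg : pvJ g = pvJ a ++ (PySem.Int.toStr b).toList := by simp [g, f, pvJ]
      have hstep : pvStep m M (b, c) = (b + d2, d2) := rfl
      have hEm : pvJ (pvEmit m M (b, c) (n' + 1))
          = (PySem.Int.toStr b).toList ++ pvJ (pvEmit m M (pvStep m M (b, c)) n') := by
        simp [pvEmit, pvJ]
      rw [hEm, ← List.append_assoc, ← hg]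
      rw [← hstep] at ih1
      rw [ih1 n' ?_]
      rw [hEm] at hn
      rw [hg]
      simp only [List.length_append] at hn ⊢
      push_cast at hn ⊢
      omega
  | case3 a b c e =>
    intro hn
    rw [pvJ_len] at e
    rw [List.take_append_of_le_length (by omega)]

theorem pvStep_up (m M c : Int) (h : c ≠ M) : pvStep m M (c, 1) = (c + 1, 1) := by
  simp [pvStep, h]
theorem pvStep_top (m M : Int) (h : m < M) (d : Int) : pvStep m M (M, d) = (M - 1, -1) := by
  simp [pvStep]; omega
theorem pvStep_down (m M c : Int) (hm : m < c) (hM : c < M) :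
    pvStep m M (c, -1) = (c - 1, -1) := by
  simp [pvStep, show c ≠ M by omega, show c ≠ m by omega]; omega
theorem pvStep_bot (m M : Int) (h : m < M) (d : Int) : pvStep m M (m, d) = (m + 1, 1) := by
  simp [pvStep, show m ≠ M by omega]

theorem pvEmit_up (m M : Int) (hmM : m < M) :
    ∀ (k : Nat) (c : Int), c + k = M →
      pvEmit m M (c, 1) (k + 1)
          = (List.range (k + 1)).map (fun j : Nat => PySem.Int.toStr (c + (j : Int))) ∧
        (pvStep m M)^[k + 1] (c, 1) = (M - 1, -1) := by
  intro k
  induction k with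
  | zero =>
    intro c hc
    have hce : c = M := by omega
    subst hce
    refine ⟨by simp [pvEmit], ?_⟩
    simpa using pvStep_top m c hmM 1
  | succ k ih =>
    intro c hc
    have hcM : c ≠ M := by omega
    have h1 : pvStep m M (c, 1) = (c + 1, 1) := pvStep_up m M c hcM
    obtain ⟨e1, e2⟩ := ih (c + 1) (by push_cast at hc ⊢; omega)
    constructor
    · show PySem.Int.toStr c :: pvEmit m M (pvStep m M (c, 1)) (k + 1) = _
      rw [h1, e1, List.range_succ_eq_map, List.range_succ_eq_map]
      simp only [List.map_cons, List.map_map, Function.comp_def, Nat.cast_zero, Nat.cast_add,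
        Nat.cast_one, List.cons.injEq]
      refine ⟨by norm_num, ?_⟩
      rw [List.range_succ_eq_map]
      simp only [List.map_cons, List.map_map, Function.comp_def, Nat.succ_eq_add_one,
        List.cons.injEq]
      refine ⟨by norm_num, ?_⟩
      apply List.map_congr_left; intro j hj; congr 1; push_cast; ring
    · rw [Function.iterate_succ_apply, h1, e2]

theorem pvEmit_down (m M : Int) (hmM : m < M) :
    ∀ (k : Nat) (c : Int), c - k = m + 1 → c < M →
      pvEmit m M (c, -1) (k + 1)
          = (List.range (k + 1)).map (fun j : Nat => PySem.Int.toStr (c - (j : Int))) ∧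
        (pvStep m M)^[k + 1] (c, -1) = (m, -1) := by
  intro k
  induction k with
  | zero =>
    intro c hc hcM
    have hce : c = m + 1 := by omega
    subst hce
    refine ⟨by simp [pvEmit], ?_⟩
    simpa using pvStep_down m M (m + 1) (by omega) hcM
  | succ k ih =>
    intro c hc hcM
    have h1 : pvStep m M (c, -1) = (c - 1, -1) := pvStep_down m M c (by omega) hcM
    obtain ⟨e1, e2⟩ := ih (c - 1) (by push_cast at hc ⊢; omega) (by omega)
    constructor
    · show PySem.Int.toStr c :: pvEmit m M (pvStep m M (c, -1)) (k + 1) = _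
      rw [h1, e1, List.range_succ_eq_map, List.range_succ_eq_map]
      simp only [List.map_cons, List.map_map, Function.comp_def, Nat.cast_zero, Nat.cast_add,
        Nat.cast_one, List.cons.injEq]
      refine ⟨by norm_num, ?_⟩
      rw [List.range_succ_eq_map]
      simp only [List.map_cons, List.map_map, Function.comp_def, Nat.succ_eq_add_one,
        List.cons.injEq]
      refine ⟨by norm_num, ?_⟩
      apply List.map_congr_left; intro j hj; congr 1; push_cast; ring
    · rw [Function.iterate_succ_apply, h1, e2]

def pvCyc (m M : Int) : List String :=
  (List.range ((M - m).toNat + 1)).map (fun j : Nat => PySem.Int.toStr (m + (j : Int)))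
    ++ (List.range ((M - m).toNat - 1)).map (fun j : Nat => PySem.Int.toStr (M - 1 - (j : Int)))

theorem pvEmit_split (m M : Int) (s : Int × Int) (a b : Nat) :
    pvEmit m M s (a + b) = pvEmit m M s a ++ pvEmit m M ((pvStep m M)^[a] s) b := by
  induction a generalizing s with
  | zero => simp [pvEmit]
  | succ a ih =>
    rw [show a + 1 + b = (a + b) + 1 from by omega]
    simp only [pvEmit, ih (pvStep m M s), Function.iterate_succ_apply, List.cons_append]

theorem pvEmit_cycle (m M : Int) (hmM : m < M) :
    pvEmit m M (m, 1) (2 * (M - m).toNat) = pvCyc m M ∧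
      (pvStep m M)^[2 * (M - m).toNat] (m, 1) = (m, -1) := by
  set k1 : Nat := (M - m).toNat with hk1
  have hk1pos : 1 ≤ k1 := by omega
  by_cases hM1 : M = m + 1
  · have hk1e : k1 = 1 := by omega
    obtain ⟨e1, e2⟩ := pvEmit_up m M hmM 1 m (by push_cast; omega)
    rw [show 2 * k1 = 1 + 1 from by omega]
    constructor
    · rw [e1]; simp [pvCyc, ← hk1, hk1e]
    · rw [e2, hM1]; norm_num
  · -- M > m + 1 : ascend k1+1 values, descend k1-1 values
    have hsum : 2 * k1 = (k1 + 1) + (k1 - 1) := by omega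
    obtain ⟨e1, e2⟩ := pvEmit_up m M hmM k1 m (by omega)
    obtain ⟨d1, d2⟩ := pvEmit_down m M hmM (k1 - 2) (M - 1) (by omega) (by omega)
    rw [hsum, pvEmit_split, e1, e2, show k1 - 1 = (k1 - 2) + 1 from by omega, d1]
    refine ⟨?_, ?_⟩
    · simp only [pvCyc, ← hk1]
      rw [show k1 - 1 = (k1 - 2) + 1 from by omega]
    · rw [add_comm (k1 + 1), Function.iterate_add_apply, e2, d2]

theorem pvRange_neg_one (a b : Int) :
    PySem.List.pyRange a b (-1) = (List.range (a - b).toNat).map (fun k : Nat => a - (k : Int)) := by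
  rw [PySem.List.pyRange]
  norm_num
  by_cases h : b < a
  · rw [if_pos h]
    apply List.map_congr_left; intro j hj; ring
  · rw [if_neg h]
    have : (a - b).toNat = 0 := by omega
    simp [this]

theorem pvPeriod_eq (m M : Int) (hmM : m < M) :
    (PySem.List.pyRange m (M + 1) 1 ++ PySem.List.pyRange (M - 1) m (-1)).map PySem.Int.toStr
      = pvCyc m M := by
  rw [List.map_append, PySem.List.pyRange_one, pvRange_neg_one, pvCyc]
  congr 1
  · rw [show (M + 1 - m).toNat = (M - m).toNat + 1 from by omega]
    simp [List.map_map, Function.comp_def]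
  · rw [show (M - 1 - m).toNat = (M - m).toNat - 1 from by omega]
    simp [List.map_map, Function.comp_def]


theorem pvEmit_bot_dir (m M : Int) (hmM : m < M) (n : Nat) :
    pvEmit m M (m, -1) n = pvEmit m M (m, 1) n := by
  cases n with
  | zero => rfl
  | succ n => simp only [pvEmit, pvStep_bot m M hmM]

theorem pvEmit_rep (m M : Int) (hmM : m < M) (k : Nat) :
    pvEmit m M (m, 1) (2 * (M - m).toNat * k) = (List.replicate k (pvCyc m M)).flatten := by
  induction k with
  | zero => simp [pvEmit]
  | succ k ih =>
    rw [show 2 * (M - m).toNat * (k + 1) = 2 * (M - m).toNat + 2 * (M - m).toNat * k from by ring]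
    rw [pvEmit_split, (pvEmit_cycle m M hmM).2, pvEmit_bot_dir m M hmM, ih,
      (pvEmit_cycle m M hmM).1]
    simp [List.replicate_succ]

theorem pvJ_rep (k : Nat) (cyc : List String) :
    pvJ ((List.replicate k cyc).flatten) = (List.replicate k (pvJ cyc)).flatten := by
  induction k with
  | zero => rfl
  | succ k ih => simp [List.replicate_succ, pvJ_append, ih]

theorem pvFlat_rep_len {α : Type} (k : Nat) (xs : List α) :
    (List.replicate k xs).flatten.length = k * xs.length := by
  induction k with
  | zero => simp
  | succ k ih => simp [List.replicate_succ, ih]; ring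

theorem pvCyc_len_pos (m M : Int) (hmM : m < M) : 0 < (pvJ (pvCyc m M)).length := by
  rw [pvCyc, pvJ_append, List.range_succ_eq_map, List.map_cons]
  have h := pvToStr_len_pos m
  simp [pvJ]
  rw [PySem.Int.toList_toStr] at h
  exact Or.inl h

theorem pvSlice_nil (a b : Option Int) : PySem.List.slice ([] : List Char) a b = [] := by
  simp [PySem.List.slice]

theorem pvEmit_up_partial (m M : Int) :
    ∀ (k : Nat) (c : Int), c + k ≤ M + 1 →
      pvEmit m M (c, 1) k = (List.range k).map (fun j : Nat => PySem.Int.toStr (c + (j : Int))) := by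
  intro k
  induction k with
  | zero => intro c _; rfl
  | succ k ih =>
    intro c hc
    cases k with
    | zero => simp [pvEmit, List.range_succ]
    | succ k' =>
      have hcM : c ≠ M := by push_cast at hc; omega
      show PySem.Int.toStr c :: pvEmit m M (pvStep m M (c, 1)) (k' + 1) = _
      rw [pvStep_up m M c hcM, ih (c + 1) (by push_cast at hc ⊢; omega),
        List.range_succ_eq_map, List.range_succ_eq_map]
      simp only [List.map_cons, List.map_map, Function.comp_def, Nat.cast_zero,
        List.cons.injEq]
      refine ⟨by norm_num, ?_⟩
      rw [List.range_succ_eq_map]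
      simp only [List.map_cons, List.map_map, Function.comp_def, Nat.succ_eq_add_one,
        List.cons.injEq]
      refine ⟨by norm_num, ?_⟩
      apply List.map_congr_left; intro j hj; congr 1; push_cast; ring

theorem pvJ_map_len_ge (xs : List Int) :
    xs.length ≤ (pvJ (xs.map PySem.Int.toStr)).length := by
  induction xs with
  | nil => simp [pvJ]
  | cons x xs ih =>
    have h := pvToStr_len_pos x
    simp only [List.map_cons, List.length_cons]
    have : pvJ (PySem.Int.toStr x :: xs.map PySem.Int.toStr)
        = (PySem.Int.toStr x).toList ++ pvJ (xs.map PySem.Int.toStr) := by simp [pvJ]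
    rw [this, List.length_append]
    omega

theorem pvJoin_toList' (rs : List String) :
    (PySem.Str.join "" rs).toList = pvJ rs := pvJoin_toList rs

-- ===== VERDICT (by name: the statement is the Claim_ definition above) =====
theorem ascend_descend_spec : Claim_equal_ascend_descend := by
  intro L m M _
  unfold Spec_ascend_descend ascend_descend ascend_descend_alt
  by_cases h1 : M < m
  · simp [h1]
  · by_cases hL0 : L = 0
    · simp [h1, hL0]
    · by_cases hmm : m = M
      · subst hmm
        by_cases hLpos : 0 < L
        · simp [h1, hL0, not_le.mpr hLpos]
        · have hLneg : L < 0 := by omega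
          simp [h1, hL0, le_of_lt hLneg, PySem.List.pyRepeat,
            Int.toNat_of_nonpos (le_of_lt hLneg)]
      · have hmM : m < M := by omega
        by_cases hLpos : 0 < L
        · -- main case: L > 0, m < M
          by_cases hclip : M - m > L
          · simp only [h1, hL0, hmm, not_le.mpr hLpos, hclip, decide_false, decide_true,
              Bool.false_or, Bool.or_false, beq_iff_eq, Bool.false_eq_true, if_false, if_true]
            apply String.toList_inj.mp
            rw [PySem.Str.toList_slice, PySem.Str.toList_slice]
            simp only [PySem.Chars.slice_eq_listSlice]
            rw [PySem.List.slice_to _ (le_of_lt hLpos), PySem.List.slice_to _ (le_of_lt hLpos)]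
            rw [pvJoin_toList', pvJoin_toList']
            have hk : (m + L + 1 - m).toNat = L.toNat + 1 := by omega
            have hup := pvEmit_up_partial m M (L.toNat + 1) m (by push_cast; omega)
            have hcov : L ≤ ((pvJ ([] : List String)).length : Int)
                + ((pvJ (pvEmit m M (m, 1) (L.toNat + 1))).length : Int) := by
              rw [hup]
              have h2 : (List.range (L.toNat + 1)).map (fun j : Nat => PySem.Int.toStr (m + (j : Int)))
                  = ((List.range (L.toNat + 1)).map (fun j : Nat => m + (j : Int))).map PySem.Int.toStr := by
                simp [List.map_map, Function.comp_def]
              rw [h2]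
              have h3 := pvJ_map_len_ge ((List.range (L.toNat + 1)).map (fun j : Nat => m + (j : Int)))
              simp only [List.length_map, List.length_range] at h3
              have h0 : (pvJ ([] : List String)).length = 0 := rfl
              rw [h0]
              push_cast
              omega
            rw [pvLoop_take L m M [] m 1 (L.toNat + 1) hcov]
            have h0 : pvJ ([] : List String) = [] := rfl
            rw [h0, List.nil_append, hup, PySem.List.pyRange_one, hk]
            simp [List.map_map, Function.comp_def]
          · simp only [h1, hL0, hmm, not_le.mpr hLpos, hclip, decide_false, decide_true,
              Bool.false_or, Bool.or_false, decide_eq_true_eq, beq_iff_eq,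
              Bool.false_eq_true, if_false]
            have hPt : (PySem.Str.join ""
                (List.map PySem.Int.toStr
                  (PySem.List.pyRange m (M + 1) ++ PySem.List.pyRange (M - 1) m (-1)))).toList
                = pvJ (pvCyc m M) := by
              rw [pvJoin_toList', ← pvPeriod_eq m M hmM]
            have hPl : PySem.Str.len (PySem.Str.join ""
                (List.map PySem.Int.toStr
                  (PySem.List.pyRange m (M + 1) ++ PySem.List.pyRange (M - 1) m (-1))))
                = (((pvJ (pvCyc m M)).length : Nat) : Int) := by
              rw [PySem.Str.len_eq, hPt]
            rw [hPt, hPl]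
            set B : Nat := (pvJ (pvCyc m M)).length with hB
            have hBpos : 0 < B := pvCyc_len_pos m M hmM
            set R : Int := -PySem.Int.floordiv (-L) (B : Int) with hR
            obtain ⟨hlow, hup⟩ :=
              (PySem.Int.neg_floordiv_neg_eq_iff_of_pos (a := L) (b := (B : Int))
                (by exact_mod_cast hBpos)).mp hR.symm
            have hRpos : 0 < R := by nlinarith
            apply String.toList_inj.mp
            rw [PySem.Str.toList_slice, PySem.Str.toList_slice]
            simp only [PySem.Chars.slice_eq_listSlice]
            rw [PySem.List.slice_to _ (le_of_lt hLpos), PySem.List.slice_to _ (le_of_lt hLpos)]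
            rw [String.toList_ofList, pvJoin_toList']
            have hcov : L ≤ ((pvJ ([] : List String)).length : Int)
                + ((pvJ (pvEmit m M (m, 1) (2 * (M - m).toNat * R.toNat))).length : Int) := by
              rw [pvEmit_rep m M hmM, pvJ_rep, pvFlat_rep_len]
              have h0 : (pvJ ([] : List String)).length = 0 := rfl
              rw [h0]
              push_cast
              rw [Int.toNat_of_nonneg (le_of_lt hRpos)]
              linarith
            rw [pvLoop_take L m M [] m 1 (2 * (M - m).toNat * R.toNat) hcov]
            have h0 : pvJ ([] : List String) = [] := rfl
            rw [h0, List.nil_append, pvEmit_rep m M hmM, pvJ_rep]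
            rfl
        · have hLneg : L < 0 := by omega
          have hloop : adLoop L m M [] m 1 = [] := by
            rw [adLoop]
            rw [if_neg ?hc]
            case hc =>
              rw [pvJ_len]
              intro hcon
              simp [pvJ] at hcon
              omega
          simp [h1, hL0, hmm, le_of_lt hLneg, hloop]
          apply String.toList_inj.mp
          rw [PySem.Str.toList_slice]
          simp only [PySem.Chars.slice_eq_listSlice]
          rw [pvJoin_toList']
          have : pvJ ([] : List String) = [] := rfl
          rw [this, pvSlice_nil]
          rfl
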